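-- pv_equiv track=rewrite | github.com/psmeros/SciLens | experimental/articles_ops.py | quote_indicators
-- ===== SOURCE A (Python) =====
-- def quote_indicators(quotes):
--     count_PER_quotes = 0
--     count_ORG_quotes = 0
--     count_unnamed_quotes = 0
--     count_all_quotes = 0
--     for q in quotes:
--         if q['quoteeType'] == 'PERSON':
--             count_PER_quotes += 1
--         if q['quoteeType'] == 'ORG':
--             count_ORG_quotes += 1
--         if 'unnamed' in q['quoteeType']:
--             count_unnamed_quotes += 1
--     count_all_quotes = count_PER_quotes + count_ORG_quotes + count_unnamed_quotes
--     return {'count_all_quotes':count_all_quotes, 'count_PER_quotes':count_PER_quotes, 'count_ORG_quotes':count_ORG_quotes, 'count_unnamed_quotes':count_unnamed_quotes}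
-- ===== SOURCE B (Python) =====
-- def quote_indicators(quotes):
--     # Build a frequency table of quotee types once, then answer the three
--     # counts as queries against it (the 'unnamed' count scans the distinct
--     # keys of the table, not the quotes).
--     freq = {}
--     for q in quotes:
--         t = q['quoteeType']
--         freq[t] = freq.get(t, 0) + 1
--     count_PER_quotes = freq.get('PERSON', 0)
--     count_ORG_quotes = freq.get('ORG', 0)
--     count_unnamed_quotes = sum(v for k, v in freq.items() if 'unnamed' in k)
--     count_all_quotes = count_PER_quotes + count_ORG_quotes + count_unnamed_quotes
--     return {'count_all_quotes': count_all_quotes,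
--             'count_PER_quotes': count_PER_quotes,
--             'count_ORG_quotes': count_ORG_quotes,
--             'count_unnamed_quotes': count_unnamed_quotes}
-- ===== Notes on version B (the rewrite author's own statement) =====
-- stated objective: alternative
-- what changed: Replaces A's single loop with four branching counters by an index-then-query strategy: one pass builds a frequency table keyed by quotee type, then PERSON/ORG are dictionary lookups and the unnamed count is a sum over the table's distinct keys.
import Mathlib
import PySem

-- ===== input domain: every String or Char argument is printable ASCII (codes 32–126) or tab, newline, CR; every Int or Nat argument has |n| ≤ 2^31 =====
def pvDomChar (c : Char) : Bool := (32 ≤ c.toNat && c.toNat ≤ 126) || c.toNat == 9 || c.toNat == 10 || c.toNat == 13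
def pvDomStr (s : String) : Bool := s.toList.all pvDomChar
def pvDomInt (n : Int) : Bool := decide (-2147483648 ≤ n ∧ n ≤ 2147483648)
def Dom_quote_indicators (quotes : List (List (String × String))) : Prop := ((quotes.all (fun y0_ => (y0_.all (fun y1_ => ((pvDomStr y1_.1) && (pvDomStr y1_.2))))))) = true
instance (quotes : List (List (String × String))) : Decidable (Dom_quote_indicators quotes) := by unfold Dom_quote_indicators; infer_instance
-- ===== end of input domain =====

-- B replaces A's single four-counter branching loop by building a frequency table of
-- quotee types and answering the three counts as queries against it; return value only,
-- neither version mutates its argument.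

-- ===== PORT A =====
-- q['quoteeType'] : first-match lookup; total form getD is used, Pre_ excludes the KeyError inputs
def qiType (q : List (String × String)) : String :=
  (PySem.Dict.mk q).getD "quoteeType" ""

def quote_indicators (quotes : List (List (String × String))) : List (String × Int) :=
  let s := quotes.foldl (fun (s : Int × Int × Int) q =>
    (if qiType q == "PERSON" then s.1 + 1 else s.1,
     if qiType q == "ORG" then s.2.1 + 1 else s.2.1,
     if PySem.Str.isIn "unnamed" (qiType q) then s.2.2 + 1 else s.2.2)) (0, 0, 0)
  [("count_all_quotes", s.1 + s.2.1 + s.2.2),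
   ("count_PER_quotes", s.1),
   ("count_ORG_quotes", s.2.1),
   ("count_unnamed_quotes", s.2.2)]

-- ===== PORT B =====
def quote_indicators_alt (quotes : List (List (String × String))) : List (String × Int) :=
  let freq := quotes.foldl (fun (d : PySem.Dict String Int) q =>
    d.insert (qiType q) (d.getD (qiType q) 0 + 1)) PySem.Dict.empty
  let per := freq.getD "PERSON" 0
  let org := freq.getD "ORG" 0
  let unnamed := ((freq.items.filter (fun p => PySem.Str.isIn "unnamed" p.1)).map (·.2)).sum
  [("count_all_quotes", per + org + unnamed),
   ("count_PER_quotes", per),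
   ("count_ORG_quotes", org),
   ("count_unnamed_quotes", unnamed)]

-- ===== PRECONDITION & SPEC =====
-- Pre_ excludes exactly the inputs where some quote lacks the 'quoteeType' key, on which A raises KeyError.
def Pre_quote_indicators (quotes : List (List (String × String))) : Prop :=
  ∀ q ∈ quotes, "quoteeType" ∈ q.map Prod.fst
instance (quotes : List (List (String × String))) : Decidable (Pre_quote_indicators quotes) := by unfold Pre_quote_indicators; infer_instance
def pvWitness_quote_indicators : (List (List (String × String))) := [[("quoteeType", "PERSON")], [("quoteeType", "an unnamed source")]]

def Spec_quote_indicators (quotes : List (List (String × String))) (out : List (String × Int)) : Prop := out = quote_indicators_alt quotes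
instance (quotes : List (List (String × String))) (out : List (String × Int)) : Decidable (Spec_quote_indicators quotes out) := by unfold Spec_quote_indicators; infer_instance

-- ===== CLAIM (what is proved, stated in full; the proofs are below) =====
def Claim_equal_quote_indicators : Prop := ∀ (quotes : List (List (String × String))), Dom_quote_indicators quotes → Pre_quote_indicators quotes → Spec_quote_indicators quotes (quote_indicators quotes)

-- ===== LEMMAS AND PROOFS =====

def unnamedP (t : String) : Bool := PySem.Str.isIn "unnamed" t

lemma triA (ts : List String) (a b c : Int) :
    ts.foldl (fun (s : Int × Int × Int) t =>
      (if t == "PERSON" then s.1 + 1 else s.1,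
       if t == "ORG" then s.2.1 + 1 else s.2.1,
       if unnamedP t then s.2.2 + 1 else s.2.2)) (a, b, c)
    = (a + ts.count "PERSON", b + ts.count "ORG", c + ts.countP unnamedP) := by
  induction ts generalizing a b c with
  | nil => simp
  | cons t ts ih =>
    simp only [List.foldl_cons, ih, List.count_cons, List.countP_cons]
    split_ifs <;> simp_all <;> omega

lemma sum_over_dedup (ts : List String) :
    (((PySem.Set.ofList ts).filter unnamedP).map (fun k => (ts.count k : Int))).sum
      = (ts.countP unnamedP : Int) := by
  have hperm : List.Perm (PySem.Set.ofList ts) ts.dedup := by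
    rw [List.perm_ext_iff_of_nodup (PySem.Set.nodup_ofList ts) ts.nodup_dedup]
    intro a; rw [PySem.Set.mem_ofList, List.mem_dedup]
  calc (((PySem.Set.ofList ts).filter unnamedP).map (fun k => (ts.count k : Int))).sum
      = ((ts.dedup.filter unnamedP).map (fun k => (ts.count k : Int))).sum :=
        ((hperm.filter unnamedP).map _).sum_eq
    _ = (((ts.dedup.filter unnamedP).map (fun k => ts.count k)).sum : Int) := by
        rw [Nat.cast_list_sum, List.map_map]; rfl
    _ = (ts.countP unnamedP : Int) := by
        rw [List.sum_map_count_dedup_filter_eq_countP]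

lemma unnamed_alt (ts : List String) :
    (((PySem.Dict.counter ts).items.filter (fun p => unnamedP p.1)).map (·.2)).sum
      = (ts.countP unnamedP : Int) := by
  rw [PySem.Dict.items_counter, List.filter_map, List.map_map]
  exact sum_over_dedup ts

-- ===== VERDICT (by name: the statement is the Claim_ definition above) =====
theorem quote_indicators_spec : Claim_equal_quote_indicators := by
  intro quotes _ _
  show quote_indicators quotes = quote_indicators_alt quotes
  have hA : quotes.foldl (fun (s : Int × Int × Int) q =>
      (if qiType q == "PERSON" then s.1 + 1 else s.1,
       if qiType q == "ORG" then s.2.1 + 1 else s.2.1,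
       if PySem.Str.isIn "unnamed" (qiType q) then s.2.2 + 1 else s.2.2)) (0, 0, 0)
      = ((((quotes.map qiType).count "PERSON" : Nat) : Int),
         (((quotes.map qiType).count "ORG" : Nat) : Int),
         (((quotes.map qiType).countP unnamedP : Nat) : Int)) := by
    have h1 := triA (quotes.map qiType) 0 0 0
    rw [List.foldl_map] at h1
    simpa [unnamedP] using h1
  have hB : quotes.foldl (fun (d : PySem.Dict String Int) q =>
      d.insert (qiType q) (d.getD (qiType q) 0 + 1)) PySem.Dict.empty
      = PySem.Dict.counter (quotes.map qiType) := by
    rw [← PySem.Dict.foldl_insert_getD_add_one_eq_counter, List.foldl_map]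
  have hU := unnamed_alt (quotes.map qiType)
  simp only [unnamedP] at hU
  simp only [quote_indicators, quote_indicators_alt, hA, hB, PySem.Dict.getD_counter, hU]
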